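-- pv_equiv track=rewrite | github.com/Mehreen676/AI_Employee_Vault_Gold_Hackathon0 | backend/routers/approve.py | _update_status
-- ===== SOURCE A (Python) =====
-- def _update_status(content: str, new_status: str, reason: str = "") -> str:
--     """Replace the `status:` field in YAML frontmatter; optionally inject rejection_reason."""
--     lines = content.split("\n")
--     result: list[str] = []
--     in_front = False
--     status_replaced = False
--
--     for i, line in enumerate(lines):
--         if i == 0 and line.strip() == "---":
--             in_front = True
--             result.append(line)
--             continue
--         if in_front and line.strip() == "---":
--             if reason and new_status == "rejected":
--                 result.append(f'rejection_reason: "{reason}"')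
--             in_front = False
--             result.append(line)
--             continue
--         if in_front and line.startswith("status:") and not status_replaced:
--             result.append(f"status: {new_status}")
--             status_replaced = True
--             continue
--         result.append(line)
--
--     return "\n".join(result)
-- ===== SOURCE B (Python) =====
-- def _update_status(content: str, new_status: str, reason: str = "") -> str:
--     """Locate the frontmatter fences first, then rewrite only the front region."""
--     lines = content.split("\n")
--     head, rest = lines[0], lines[1:]
--     if head.strip() != "---":
--         return content
--     close = next((i for i, l in enumerate(rest) if l.strip() == "---"), None)
--     out, replaced = [head], False
--     for line in (rest if close is None else rest[:close]):
--         if not replaced and line.startswith("status:"):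
--             out.append(f"status: {new_status}")
--             replaced = True
--         else:
--             out.append(line)
--     if close is None:
--         return "\n".join(out)
--     if reason and new_status == "rejected":
--         out.append(f'rejection_reason: "{reason}"')
--     return "\n".join(out + rest[close:])
-- ===== Notes on version B (the rewrite author's own statement) =====
-- stated objective: alternative
-- what changed: A is a single-pass state machine carrying in_front/status_replaced flags over enumerated lines; B first locates the closing fence index, slices the lines into front region and body, rewrites only the front region, and rejoins the pieces (returning content untouched when line 0 is not a fence).
import Mathlib
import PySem

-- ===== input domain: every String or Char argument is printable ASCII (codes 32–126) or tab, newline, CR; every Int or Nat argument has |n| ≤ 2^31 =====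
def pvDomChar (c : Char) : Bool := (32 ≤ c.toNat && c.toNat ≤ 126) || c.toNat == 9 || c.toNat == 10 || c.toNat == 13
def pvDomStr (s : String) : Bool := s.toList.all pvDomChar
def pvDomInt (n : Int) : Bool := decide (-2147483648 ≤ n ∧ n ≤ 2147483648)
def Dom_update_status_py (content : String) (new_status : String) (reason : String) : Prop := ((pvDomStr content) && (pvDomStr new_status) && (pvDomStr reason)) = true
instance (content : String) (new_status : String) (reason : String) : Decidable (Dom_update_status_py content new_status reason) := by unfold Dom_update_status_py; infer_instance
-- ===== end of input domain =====

-- B restructures A: A is a single-pass state machine over enumerated lines; B locates the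
-- closing fence first, slices front region from body, rewrites only the front region and
-- rejoins. Same O(n) cost ("alternative", not faster).

-- ===== PORT A =====
-- the body of A's for-loop; state = (in_front, status_replaced, result)
def updStepA (new_status reason : String) (st : Bool × Bool × List String) (p : Int × String) : Bool × Bool × List String :=
  let in_front := st.1
  let status_replaced := st.2.1
  let result := st.2.2
  let i := p.1
  let line := p.2
  if i == 0 && (PySem.Str.strip line == "---") then
    (true, status_replaced, result ++ [line])
  else if in_front && (PySem.Str.strip line == "---") then
    let result := if (reason != "") && (new_status == "rejected")
      then result ++ ["rejection_reason: \"" ++ reason ++ "\""] else result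
    (false, status_replaced, result ++ [line])
  else if in_front && PySem.Str.startswith line "status:" && !status_replaced then
    (in_front, true, result ++ ["status: " ++ new_status])
  else
    (in_front, status_replaced, result ++ [line])

def update_status_py (content : String) (new_status : String) (reason : String) : String :=
  -- content.split("\n"): the separator is the nonempty literal "\n", so split? is `some`
  let lines := (PySem.Str.split? content "\n").getD []
  let fin := (PySem.List.enumerate lines).foldl (updStepA new_status reason) (false, false, [])
  PySem.Str.join "\n" fin.2.2

-- ===== PORT B =====
-- the body of B's for-loop; state = (out, replaced)
def replStepB (new_status : String) (st : List String × Bool) (line : String) : List String × Bool :=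
  if !st.2 && PySem.Str.startswith line "status:" then
    (st.1 ++ ["status: " ++ new_status], true)
  else
    (st.1 ++ [line], st.2)

def update_status_py_alt (content : String) (new_status : String) (reason : String) : String :=
  let lines := (PySem.Str.split? content "\n").getD []
  match lines with
  | [] => content        -- unreachable: str.split never yields an empty list
  | head :: rest =>
    if PySem.Str.strip head != "---" then content
    else
      match rest.findIdx? (fun l => PySem.Str.strip l == "---") with
      | none =>
        let p := rest.foldl (replStepB new_status) ([head], false)
        PySem.Str.join "\n" p.1
      | some close =>
        let p := (rest.take close).foldl (replStepB new_status) ([head], false)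
        let out := if (reason != "") && (new_status == "rejected")
          then p.1 ++ ["rejection_reason: \"" ++ reason ++ "\""] else p.1
        PySem.Str.join "\n" (out ++ rest.drop close)

-- ===== PRECONDITION & SPEC =====
def Spec_update_status_py (content : String) (new_status : String) (reason : String) (out : String) : Prop := out = update_status_py_alt content new_status reason
instance (content : String) (new_status : String) (reason : String) (out : String) : Decidable (Spec_update_status_py content new_status reason out) := by unfold Spec_update_status_py; infer_instance

-- ===== CLAIM (what is proved, stated in full; the proofs are below) =====
def Claim_equal_update_status_py : Prop := ∀ (content : String) (new_status : String) (reason : String), Dom_update_status_py content new_status reason → Spec_update_status_py content new_status reason (update_status_py content new_status reason)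

-- ===== LEMMAS AND PROOFS =====

-- join sep (xs ++ [y]) appends y (with a separator unless xs was empty)
lemma join_append_singleton (sep y : List Char) (xs : List (List Char)) :
    PySem.Chars.join sep (xs ++ [y]) =
      PySem.Chars.join sep xs ++ (if xs.isEmpty then [] else sep) ++ y := by
  induction xs with
  | nil => simp [PySem.Chars.join_singleton, PySem.Chars.join_nil]
  | cons a t ih =>
    cases t with
    | nil => simp [PySem.Chars.join_cons_cons, PySem.Chars.join_singleton]
    | cons b t' =>
      rw [List.cons_append, List.cons_append, PySem.Chars.join_cons_cons,
        ← List.cons_append, ih, PySem.Chars.join_cons_cons]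
      simp [List.append_assoc]

-- invariant of CPython's split loop: joining the pieces restores the input
lemma go_join (sep : List Char) (hsep : sep ≠ []) :
    ∀ (fuel : Nat) (l cur : List Char) (acc : List (List Char)), l.length ≤ fuel →
      PySem.Chars.join sep (PySem.Chars.splitOn.go sep fuel l cur acc) =
        PySem.Chars.join sep acc.reverse ++ (if acc.isEmpty then [] else sep) ++ cur.reverse ++ l := by
  intro fuel
  induction fuel with
  | zero =>
    intro l cur acc hl
    have hnil : l = [] := List.eq_nil_of_length_eq_zero (Nat.le_zero.mp hl)
    subst hnil
    rw [PySem.Chars.splitOn.go, List.reverse_cons, join_append_singleton]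
    simp
  | succ f ih =>
    intro l cur acc hl
    cases l with
    | nil =>
      rw [PySem.Chars.splitOn.go]
      · rw [List.reverse_cons, join_append_singleton]; simp
      · omega
    | cons c rest =>
      rw [PySem.Chars.splitOn.go]
      have hslen : 1 ≤ sep.length := by cases sep <;> simp_all
      by_cases hp : sep.isPrefixOf (c :: rest) = true
      · rw [if_pos hp, ih _ _ _ (by simp only [List.length_drop, List.length_cons] at *; omega)]
        have hpre : sep ++ (c :: rest).drop sep.length = c :: rest :=
          List.prefix_iff_eq_append.mp (List.isPrefixOf_iff_prefix.mp hp)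
        rw [List.reverse_cons, join_append_singleton]
        simp only [List.isEmpty_cons, List.isEmpty_reverse, List.reverse_nil, if_false,
          Bool.false_eq_true, List.nil_append, List.append_assoc, hpre]
      · rw [if_neg hp, ih _ _ _ (by simpa using Nat.lt_succ_iff.mp (by simpa using hl))]
        simp [List.append_assoc]

lemma join_split_getD (s : String) :
    PySem.Str.join "\n" ((PySem.Str.split? s "\n").getD []) = s := by
  have h := go_join ("\n".toList) (by decide) (s.toList.length + 1) s.toList [] [] (by omega)
  simp only [PySem.Str.split?, PySem.Chars.split?, PySem.Str.join, PySem.Chars.splitOn] at h ⊢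
  simp only [List.isEmpty_nil, List.reverse_nil, PySem.Chars.join_nil, if_true,
    List.nil_append, List.append_nil] at h
  rw [if_neg (by decide), Option.map_some, Option.getD_some, List.map_map]
  simp only [Function.comp_def, String.toList_ofList, List.map_id']
  rw [h, String.ofList_toList]

lemma go_ne_nil (sep : List Char) :
    ∀ (fuel : Nat) (l cur : List Char) (acc : List (List Char)),
      PySem.Chars.splitOn.go sep fuel l cur acc ≠ [] := by
  intro fuel
  induction fuel with
  | zero => intro l cur acc; rw [PySem.Chars.splitOn.go]; simp
  | succ f ih =>
    intro l cur acc
    cases l with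
    | nil =>
      rw [PySem.Chars.splitOn.go]
      · simp
      · omega
    | cons c rest =>
      rw [PySem.Chars.splitOn.go]
      by_cases hp : sep.isPrefixOf (c :: rest) = true
      · rw [if_pos hp]; exact ih _ _ _
      · rw [if_neg hp]; exact ih _ _ _

lemma split_getD_ne_nil (s : String) : (PySem.Str.split? s "\n").getD [] ≠ [] := by
  simp [PySem.Str.split?, PySem.Chars.split?, PySem.Chars.splitOn]
  exact go_ne_nil _ _ _ _ _

-- after the closing fence (or with no frontmatter at all) A just copies lines through
lemma foldA_copy (ns r : String) :
    ∀ (ls : List String) (k : Int) (sr : Bool) (acc : List String), 1 ≤ k →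
      (PySem.List.enumerate ls k).foldl (updStepA ns r) (false, sr, acc) = (false, sr, acc ++ ls) := by
  intro ls
  induction ls with
  | nil => intro k sr acc hk; simp [PySem.List.enumerate]
  | cons x t ih =>
    intro k sr acc hk
    rw [PySem.List.enumerate_cons, List.foldl_cons]
    have hk0 : (k == 0) = false := by simp; omega
    have hstep : updStepA ns r (false, sr, acc) (k, x) = (false, sr, acc ++ [x]) := by
      simp [updStepA, hk0]
    rw [hstep, ih (k + 1) sr (acc ++ [x]) (by omega)]
    simp

-- inside frontmatter A's machine computes exactly B's slice-and-rewrite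
lemma foldA_front (ns r : String) :
    ∀ (ls : List String) (k : Int) (sr : Bool) (acc : List String), 1 ≤ k →
      (PySem.List.enumerate ls k).foldl (updStepA ns r) (true, sr, acc) =
        match ls.findIdx? (fun l => PySem.Str.strip l == "---") with
        | none => ((true, (ls.foldl (replStepB ns) (acc, sr)).2, (ls.foldl (replStepB ns) (acc, sr)).1) : Bool × Bool × List String)
        | some j =>
            (false, ((ls.take j).foldl (replStepB ns) (acc, sr)).2,
              (if (r != "") && (ns == "rejected")
                then ((ls.take j).foldl (replStepB ns) (acc, sr)).1 ++ ["rejection_reason: \"" ++ r ++ "\""]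
                else ((ls.take j).foldl (replStepB ns) (acc, sr)).1) ++ ls.drop j) := by
  intro ls
  induction ls with
  | nil => intro k sr acc hk; simp [PySem.List.enumerate]
  | cons x t ih =>
    intro k sr acc hk
    rw [PySem.List.enumerate_cons, List.foldl_cons, List.findIdx?_cons]
    have hk0 : (k == 0) = false := by simp; omega
    by_cases hf : (PySem.Str.strip x == "---") = true
    · have hstep : updStepA ns r (true, sr, acc) (k, x) =
          (false, sr, (if (r != "") && (ns == "rejected")
            then acc ++ ["rejection_reason: \"" ++ r ++ "\""] else acc) ++ [x]) := by
        simp [updStepA, hk0, hf]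
      rw [hstep, foldA_copy ns r t (k + 1) sr _ (by omega), if_pos hf]
      simp [List.append_assoc]
    · rw [if_neg hf]
      cases hsr : sr with
      | false =>
        by_cases hst : PySem.Str.startswith x "status:" = true
        · have hst' : PySem.Chars.startswith x.toList ['s','t','a','t','u','s',':'] = true := by
            simpa using hst
          have hstep : updStepA ns r (true, false, acc) (k, x) = (true, true, acc ++ ["status: " ++ ns]) := by
            simp [updStepA, hk0, hf, hst']
          have hb : replStepB ns (acc, false) x = (acc ++ ["status: " ++ ns], true) := by
            simp [replStepB, hst']
          rw [hstep, ih (k + 1) true (acc ++ ["status: " ++ ns]) (by omega)]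
          cases h2 : t.findIdx? (fun l => PySem.Str.strip l == "---") with
          | none => simp [List.foldl_cons, hb]
          | some j => simp [List.take_succ_cons, List.drop_succ_cons, List.foldl_cons, hb]
        · have hst' : PySem.Chars.startswith x.toList ['s','t','a','t','u','s',':'] = false := by
            simpa using hst
          have hstep : updStepA ns r (true, false, acc) (k, x) = (true, false, acc ++ [x]) := by
            simp [updStepA, hk0, hf, hst']
          have hb : replStepB ns (acc, false) x = (acc ++ [x], false) := by
            simp [replStepB, hst']
          rw [hstep, ih (k + 1) false (acc ++ [x]) (by omega)]
          cases h2 : t.findIdx? (fun l => PySem.Str.strip l == "---") with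
          | none => simp [List.foldl_cons, hb]
          | some j => simp [List.take_succ_cons, List.drop_succ_cons, List.foldl_cons, hb]
      | true =>
        have hstep : updStepA ns r (true, true, acc) (k, x) = (true, true, acc ++ [x]) := by
          simp [updStepA, hk0, hf]
        have hb : replStepB ns (acc, true) x = (acc ++ [x], true) := by
          simp [replStepB]
        rw [hstep, ih (k + 1) true (acc ++ [x]) (by omega)]
        cases h2 : t.findIdx? (fun l => PySem.Str.strip l == "---") with
        | none => simp [List.foldl_cons, hb]
        | some j => simp [List.take_succ_cons, List.drop_succ_cons, List.foldl_cons, hb]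

-- ===== VERDICT (by name: the statement is the Claim_ definition above) =====
theorem update_status_py_spec : Claim_equal_update_status_py := by
  intro content ns r _
  unfold Spec_update_status_py update_status_py update_status_py_alt
  obtain ⟨head, rest, hE⟩ := List.exists_cons_of_ne_nil (split_getD_ne_nil content)
  rw [hE]
  simp only [PySem.List.enumerate_cons, List.foldl_cons, zero_add]
  by_cases hf : (PySem.Str.strip head == "---") = true
  · have hstep : updStepA ns r (false, false, []) (0, head) = (true, false, [head]) := by
      simp [updStepA, hf]
    rw [hstep, foldA_front ns r rest 1 false [head] (by omega)]
    have hbne : (PySem.Str.strip head != "---") = false := by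
      simp [bne, hf]
    cases h2 : rest.findIdx? (fun l => PySem.Str.strip l == "---") with
    | none => simp [hbne]
    | some j => simp [hbne]
  · have hstep : updStepA ns r (false, false, []) (0, head) = (false, false, [head]) := by
      simp [updStepA, hf]
    rw [hstep, foldA_copy ns r rest 1 false [head] (by omega)]
    have hcons : ([head] : List String) ++ rest = head :: rest := rfl
    have hbne : (PySem.Str.strip head != "---") = true := by
      simp [bne, hf]
    rw [hcons, ← hE, join_split_getD]
    simp [hbne]
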